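-- pv_equiv track=rewrite | github.com/YF36/nanobot | nanobot/agent/context.py | _split_history_chunks
-- ===== SOURCE A (Python) =====
-- from typing import Any
--
-- def _split_history_chunks(history: list[dict[str, Any]]) -> list[list[dict[str, Any]]]:
--     """Split history into chunks anchored by user messages."""
--     chunks: list[list[dict[str, Any]]] = []
--     current: list[dict[str, Any]] = []
--     for msg in history:
--         if msg.get("role") == "user" and current:
--             chunks.append(current)
--             current = [msg]
--         else:
--             current.append(msg)
--     if current:
--         chunks.append(current)
--     return chunks
-- ===== SOURCE B (Python) =====
-- def _split_history_chunks(history):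
--     """Split history into chunks anchored by user messages (index-scan + slicing)."""
--     chunks = []
--     i = 0
--     n = len(history)
--     while i < n:
--         j = i + 1
--         while j < n and history[j].get("role") != "user":
--             j += 1
--         chunks.append(history[i:j])
--         i = j
--     return chunks
-- ===== Notes on version B (the rewrite author's own statement) =====
-- stated objective: alternative
-- what changed: B replaces A's single-pass element accumulator with index scanning: an outer loop holds the chunk start i, an inner loop scans forward for the next user message to find the chunk end j, and the chunk is taken as the slice history[i:j].
import Mathlib
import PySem

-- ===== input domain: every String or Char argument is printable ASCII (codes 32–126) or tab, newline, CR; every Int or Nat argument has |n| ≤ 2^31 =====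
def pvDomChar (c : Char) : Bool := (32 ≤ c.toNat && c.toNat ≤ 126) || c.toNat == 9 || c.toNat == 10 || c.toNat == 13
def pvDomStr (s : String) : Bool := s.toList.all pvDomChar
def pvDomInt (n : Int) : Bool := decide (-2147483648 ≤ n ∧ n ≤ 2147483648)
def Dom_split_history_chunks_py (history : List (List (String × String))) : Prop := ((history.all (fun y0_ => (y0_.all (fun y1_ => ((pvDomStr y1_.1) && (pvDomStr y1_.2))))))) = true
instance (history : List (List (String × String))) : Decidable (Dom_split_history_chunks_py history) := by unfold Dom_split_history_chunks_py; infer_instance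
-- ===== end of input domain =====

-- B replaces A's single-pass element accumulator with index scanning (outer loop = chunk start i,
-- inner loop scans for the next user message = chunk end j, chunk = slice history[i:j]);
-- objective: alternative decomposition, same O(n) cost.

-- ===== PORT A =====
-- loop body of A's for-loop, state = (chunks, current)
def pvStepA (st : List (List (List (String × String))) × List (List (String × String)))
    (msg : List (String × String)) :
    List (List (List (String × String))) × List (List (String × String)) :=
  if ((PySem.Dict.mk msg).get? "role" == some "user") && !st.2.isEmpty then
    (st.1 ++ [st.2], [msg])
  else
    (st.1, st.2 ++ [msg])

def split_history_chunks_py (history : List (List (String × String))) :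
    List (List (List (String × String))) :=
  let st := history.foldl pvStepA ([], [])
  if !st.2.isEmpty then st.1 ++ [st.2] else st.1

-- ===== PORT B =====
-- inner while loop: advance j while history[j] is not a user message
def pvScanJ (h : List (List (String × String))) (j : Nat) : Nat :=
  if _ : j < h.length then
    if !((PySem.Dict.mk (h[j]!)).get? "role" == some "user") then pvScanJ h (j + 1) else j
  else j
termination_by h.length - j

-- the inner loop never moves j backwards (needed for the outer loop's termination)
theorem pvScanJ_ge (h : List (List (String × String))) (j : Nat) : j ≤ pvScanJ h j := by
  unfold pvScanJ
  split
  · split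
    · have := pvScanJ_ge h (j + 1); omega
    · exact le_refl j
  · exact le_refl j
termination_by h.length - j

-- outer while loop, state = (chunks, i)
def pvOuter (h : List (List (String × String)))
    (chunks : List (List (List (String × String)))) (i : Nat) :
    List (List (List (String × String))) :=
  if hi : i < h.length then
    let j := pvScanJ h (i + 1)
    pvOuter h (chunks ++ [PySem.List.slice h (some (i : Int)) (some (j : Int))]) j
  else chunks
termination_by h.length - i
decreasing_by
  have := pvScanJ_ge h (i + 1)
  omega

def split_history_chunks_py_alt (history : List (List (String × String))) :
    List (List (List (String × String))) :=
  pvOuter history [] 0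

-- ===== PRECONDITION & SPEC =====
def Spec_split_history_chunks_py (history : List (List (String × String))) (out : List (List (List (String × String)))) : Prop := out = split_history_chunks_py_alt history
instance (history : List (List (String × String))) (out : List (List (List (String × String)))) : Decidable (Spec_split_history_chunks_py history out) := by unfold Spec_split_history_chunks_py; infer_instance

-- ===== CLAIM (what is proved, stated in full; the proofs are below) =====
def Claim_equal_split_history_chunks_py : Prop := ∀ (history : List (List (String × String))), Dom_split_history_chunks_py history → Spec_split_history_chunks_py history (split_history_chunks_py history)

-- ===== LEMMAS AND PROOFS =====

-- "msg is not a user message"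
def pvNU (m : List (String × String)) : Bool :=
  !((PySem.Dict.mk m).get? "role" == some "user")

-- common reference: chunk = head plus following non-user messages, recurse past them
def pvChunksOf : List (List (String × String)) → List (List (List (String × String)))
  | [] => []
  | m :: t => (m :: t.takeWhile pvNU) :: pvChunksOf (t.dropWhile pvNU)
termination_by l => l.length
decreasing_by
  have := List.length_dropWhile_le (p := pvNU) (l := t)
  simp; omega

theorem pv_take_takeWhile {α : Type} (p : α → Bool) :
    ∀ t : List α, t.take (t.takeWhile p).length = t.takeWhile p := by
  intro t
  induction t with
  | nil => rfl
  | cons a t ih =>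
    by_cases h : p a = true <;> simp [List.takeWhile_cons, h, ih]

theorem pv_drop_takeWhile {α : Type} (p : α → Bool) :
    ∀ t : List α, t.drop (t.takeWhile p).length = t.dropWhile p := by
  intro t
  induction t with
  | nil => rfl
  | cons a t ih =>
    by_cases h : p a = true <;> simp [List.takeWhile_cons, List.dropWhile_cons, h, ih]

-- ---- A side: A's fold equals pvChunksOf ----
def pvConsume (cur : List (List (String × String))) :
    List (List (String × String)) → List (List (List (String × String)))
  | [] => if cur.isEmpty then [] else [cur]
  | m :: t =>
    if ((PySem.Dict.mk m).get? "role" == some "user") && !cur.isEmpty then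
      cur :: pvConsume [m] t
    else
      pvConsume (cur ++ [m]) t

theorem pvA_foldl (l : List (List (String × String))) :
    ∀ acc cur,
      (let st := l.foldl pvStepA (acc, cur);
       if !st.2.isEmpty then st.1 ++ [st.2] else st.1) = acc ++ pvConsume cur l := by
  induction l with
  | nil =>
    intro acc cur
    simp only [List.foldl_nil, pvConsume]
    cases cur <;> simp
  | cons m t ih =>
    intro acc cur
    simp only [List.foldl_cons, pvConsume, pvStepA]
    by_cases h : (((PySem.Dict.mk m).get? "role" == some "user") && !cur.isEmpty) = true
    · simp only [h, ih]
      simp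
    · simp only [Bool.not_eq_true] at h
      simp only [h, ih]
      simp

theorem pvConsume_ne_nil (l : List (List (String × String))) :
    ∀ cur, cur ≠ [] →
      pvConsume cur l = (cur ++ l.takeWhile pvNU) :: pvChunksOf (l.dropWhile pvNU) := by
  induction l with
  | nil =>
    intro cur hc
    simp [pvConsume, hc, pvChunksOf]
  | cons m t ih =>
    intro cur hc
    rw [pvConsume]
    by_cases h : (PySem.Dict.mk m).get? "role" = some "user"
    · have hcur : cur.isEmpty = false := by simpa using hc
      simp only [h, hcur, BEq.rfl, Bool.not_false, Bool.and_true, if_pos rfl]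
      rw [ih [m] (by simp)]
      have hnu : pvNU m = false := by simp [pvNU, h]
      simp [List.takeWhile_cons, List.dropWhile_cons, hnu, pvChunksOf]
    · have hnu : pvNU m = true := by simp [pvNU, h]
      have hcond : (((PySem.Dict.mk m).get? "role" == some "user") && !cur.isEmpty) = false := by
        simp [h]
      rw [hcond]
      simp only [if_neg Bool.false_ne_true]
      rw [ih (cur ++ [m]) (by simp)]
      simp [List.takeWhile_cons, List.dropWhile_cons, hnu]

theorem pvA_eq_chunksOf (l : List (List (String × String))) :
    split_history_chunks_py l = pvChunksOf l := by
  have h := pvA_foldl l [] []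
  simp only [List.nil_append] at h
  have h' : split_history_chunks_py l = pvConsume [] l := h
  rw [h']
  cases l with
  | nil => simp [pvConsume, pvChunksOf]
  | cons m t =>
    rw [pvConsume]
    simp only [List.isEmpty_nil, Bool.not_true, Bool.and_false, if_neg Bool.false_ne_true,
      List.nil_append]
    rw [pvConsume_ne_nil t [m] (by simp), pvChunksOf]
    simp

-- ---- B side: the index scan equals pvChunksOf ----
theorem pvScanJ_eq (h : List (List (String × String))) :
    ∀ d k, k ≤ h.length → h.length - k ≤ d →
      pvScanJ h k = k + ((h.drop k).takeWhile pvNU).length := by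
  intro d
  induction d with
  | zero =>
    intro k hk hd
    have : k = h.length := by omega
    subst this
    rw [pvScanJ]
    simp
  | succ d ih =>
    intro k hk hd
    rw [pvScanJ]
    by_cases hlt : k < h.length
    · have hdrop : h.drop k = h[k] :: h.drop (k + 1) := List.drop_eq_getElem_cons hlt
      have hbang : h[k]! = h[k] := getElem!_pos h k hlt
      simp only [dif_pos hlt, hbang]
      by_cases hnu : pvNU h[k] = true
      · rw [if_pos (by simpa [pvNU] using hnu)]
        rw [ih (k + 1) (by omega) (by omega)]
        rw [hdrop, List.takeWhile_cons, if_pos hnu]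
        simp; omega
      · rw [if_neg (by simpa [pvNU] using hnu)]
        rw [hdrop, List.takeWhile_cons, if_neg hnu]
        simp
    · have : k = h.length := by omega
      subst this
      simp

theorem pvOuter_eq (h : List (List (String × String))) :
    ∀ d i acc, h.length - i ≤ d →
      pvOuter h acc i = acc ++ pvChunksOf (h.drop i) := by
  intro d
  induction d with
  | zero =>
    intro i acc hd
    have hge : h.length ≤ i := by omega
    rw [pvOuter, dif_neg (by omega)]
    rw [List.drop_eq_nil_of_le hge, pvChunksOf]
    simp
  | succ d ih =>
    intro i acc hd
    by_cases hi : i < h.length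
    · rw [pvOuter, dif_pos hi]
      have hscan := pvScanJ_eq h (h.length - (i + 1)) (i + 1) (by omega) (by omega)
      set t := h.drop (i + 1) with ht
      set tw := t.takeWhile pvNU with htw
      have htwlen : tw.length ≤ t.length := (List.takeWhile_sublist _).length_le
      have htlen : t.length = h.length - (i + 1) := by rw [ht]; simp
      have hj : pvScanJ h (i + 1) = (i + 1) + tw.length := hscan
      rw [ih (pvScanJ h (i + 1)) _ (by omega)]
      rw [List.append_assoc]
      congr 1
      -- slice h i j = first chunk; drop j = rest
      have hdropi : h.drop i = h[i] :: t := by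
        rw [ht]; exact List.drop_eq_getElem_cons hi
      have hslice : PySem.List.slice h (some (i : Int)) (some ((pvScanJ h (i + 1) : Nat) : Int))
          = h[i] :: tw := by
        rw [PySem.List.slice_natCast, hdropi, hj]
        have h1 : (i + 1 + tw.length) - i = tw.length + 1 := by omega
        rw [h1, List.take_succ_cons, htw, pv_take_takeWhile]
      have hdropj : h.drop (pvScanJ h (i + 1)) = t.dropWhile pvNU := by
        rw [hj, ← List.drop_drop, ← ht, htw]
        exact pv_drop_takeWhile pvNU t
      rw [hslice, hdropj, hdropi, pvChunksOf]
      simp [htw]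
    · rw [pvOuter, dif_neg hi]
      rw [List.drop_eq_nil_of_le (by omega), pvChunksOf]
      simp

-- ===== VERDICT (by name: the statement is the Claim_ definition above) =====
theorem split_history_chunks_py_spec : Claim_equal_split_history_chunks_py := by
  intro history _
  show split_history_chunks_py history = split_history_chunks_py_alt history
  rw [pvA_eq_chunksOf]
  unfold split_history_chunks_py_alt
  rw [pvOuter_eq history history.length 0 [] (by omega)]
  simp
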